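-- pv_equiv track=rewrite | github.com/Wulfic/Cicada3301 | Tools/prime_value_analysis.py | decrypt_with_prime_key
-- ===== SOURCE A (Python) =====
-- PRIME_VALUES = [2, 3, 5, 7, 11, 13, 17, 19, 23, 29, 31, 37, 41, 43, 47, 53, 59, 61,
--                 67, 71, 73, 79, 83, 89, 97, 101, 103, 107, 109]
--
-- PRIME_TO_INDEX = {p: i for i, p in enumerate(PRIME_VALUES)}
--
-- def decrypt_with_prime_key(cipher_indices, key_primes, operation='sub'):
--     """
--     Decrypt using prime values as key.
--
--     Instead of: plaintext = (cipher_idx - key_idx) mod 29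
--     Try: plaintext = (cipher_prime - key_prime) mod some_value
--
--     Or convert key_primes to indices first.
--     """
--     # Convert key primes to indices
--     key_indices = []
--     for p in key_primes:
--         if p in PRIME_TO_INDEX:
--             key_indices.append(PRIME_TO_INDEX[p])
--         else:
--             # Find closest prime in our alphabet
--             closest = min(PRIME_VALUES, key=lambda x: abs(x - p))
--             key_indices.append(PRIME_TO_INDEX[closest])
--
--     plaintext = []
--     for i, c in enumerate(cipher_indices):
--         k = key_indices[i % len(key_indices)]
--         if operation == 'sub':
--             plaintext.append((c - k) % 29)
--         else:
--             plaintext.append((c + k) % 29)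
--
--     return plaintext
-- ===== SOURCE B (Python) =====
-- PRIME_VALUES = [2, 3, 5, 7, 11, 13, 17, 19, 23, 29, 31, 37, 41, 43, 47, 53, 59, 61,
--                 67, 71, 73, 79, 83, 89, 97, 101, 103, 107, 109]
--
--
-- def _nearest_index(p):
--     """Index of p in the sorted prime alphabet, or of the nearest alphabet
--     prime (ties go to the smaller one), located by binary search."""
--     lo, hi = 0, len(PRIME_VALUES)
--     while lo < hi:
--         mid = (lo + hi) // 2
--         if PRIME_VALUES[mid] < p:
--             lo = mid + 1
--         else:
--             hi = mid
--     if lo == 0: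
--         return 0
--     if lo == len(PRIME_VALUES):
--         return lo - 1
--     if p - PRIME_VALUES[lo - 1] <= PRIME_VALUES[lo] - p:
--         return lo - 1
--     return lo
--
--
-- def decrypt_with_prime_key(cipher_indices, key_primes, operation='sub'):
--     step = -1 if operation == 'sub' else 1
--     shifts = [(step * _nearest_index(p)) % 29 for p in key_primes]
--     out = []
--     k = 0
--     for c in cipher_indices:
--         out.append((c + shifts[k]) % 29)
--         k += 1
--         if k == len(shifts):
--             k = 0
--     return out
-- ===== Notes on version B (the rewrite author's own statement) =====
-- stated objective: faster
-- what changed: B replaces A's hash-map lookup plus linear closest-prime argmin scan by one hand-written binary search over the sorted prime alphabet (exact hits and the nearest-prime fallback, ties to the smaller, fall out of the same search), precomputes the signed shift residues (sign*index) % 29 once, and cycles through them with a reset counter instead of A's per-position i % len modulo indexing.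
import Mathlib
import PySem

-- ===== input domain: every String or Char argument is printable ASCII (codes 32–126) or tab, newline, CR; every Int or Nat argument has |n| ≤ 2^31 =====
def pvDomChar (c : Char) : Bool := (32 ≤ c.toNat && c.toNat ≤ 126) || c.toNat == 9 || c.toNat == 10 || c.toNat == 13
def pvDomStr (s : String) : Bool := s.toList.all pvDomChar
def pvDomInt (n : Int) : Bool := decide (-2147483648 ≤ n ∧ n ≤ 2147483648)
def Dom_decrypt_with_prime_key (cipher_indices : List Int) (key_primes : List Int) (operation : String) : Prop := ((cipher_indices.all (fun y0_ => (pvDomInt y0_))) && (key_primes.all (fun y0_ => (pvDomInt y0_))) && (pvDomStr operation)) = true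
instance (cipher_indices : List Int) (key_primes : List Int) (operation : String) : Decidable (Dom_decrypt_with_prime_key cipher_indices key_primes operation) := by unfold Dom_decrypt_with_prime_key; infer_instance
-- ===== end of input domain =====

-- B replaces A's dict lookup + linear closest-prime scan by one binary search over the
-- sorted prime alphabet, precomputes the signed shift residues once, and cycles through
-- them with a reset counter instead of per-position modulo indexing (measured faster).

-- ===== PORT A =====
def pvPRIME_VALUES : List Int :=
  [2, 3, 5, 7, 11, 13, 17, 19, 23, 29, 31, 37, 41, 43, 47, 53, 59, 61,
   67, 71, 73, 79, 83, 89, 97, 101, 103, 107, 109]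

def pvPRIME_TO_INDEX : PySem.Dict Int Int :=
  (PySem.List.enumerate pvPRIME_VALUES 0).foldl (fun d ip => d.insert ip.2 ip.1) PySem.Dict.empty

def decrypt_with_prime_key (cipher_indices : List Int) (key_primes : List Int) (operation : String) : List Int :=
  let key_indices : List Int := key_primes.foldl (fun acc p =>
    if pvPRIME_TO_INDEX.contains p then
      -- PRIME_TO_INDEX[p]; the contains guard makes the key present, so getD's default is unreachable
      acc ++ [(pvPRIME_TO_INDEX.get? p).getD 0]
    else
      -- min(PRIME_VALUES, key=…): PRIME_VALUES nonempty, so min? is some; closest ∈ PRIME_VALUES so the lookup hits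
      let closest := (PySem.List.min? pvPRIME_VALUES (fun x => |x - p|)).getD 0
      acc ++ [(pvPRIME_TO_INDEX.get? closest).getD 0]) []
  (PySem.List.enumerate cipher_indices 0).foldl (fun acc ic =>
    -- key_indices[i % len(key_indices)]: Python raises ZeroDivisionError when key_indices is empty
    -- (and cipher_indices is not); Pre_ excludes exactly that
    let k := PySem.List.pyGetD key_indices (PySem.Int.mod ic.1 key_indices.length) 0
    if operation == "sub" then acc ++ [PySem.Int.mod (ic.2 - k) 29]
    else acc ++ [PySem.Int.mod (ic.2 + k) 29]) []

-- ===== PORT B =====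
-- the hand-written while loop of _nearest_index, as structural recursion on the fuel
-- (hi - lo).toNat: each iteration strictly shrinks hi - lo, so the fuel is never exhausted
-- and the recursion performs exactly the Python loop's iterations
def pvBsearchAux (p : Int) : Nat → Int → Int → Int
  | 0, lo, _ => lo
  | fuel + 1, lo, hi =>
    if lo < hi then
      let mid := PySem.Int.floordiv (lo + hi) 2
      if PySem.List.pyGetD pvPRIME_VALUES mid 0 < p then pvBsearchAux p fuel (mid + 1) hi
      else pvBsearchAux p fuel lo mid
    else lo

def pvBsearch (p lo hi : Int) : Int := pvBsearchAux p (hi - lo).toNat lo hi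

def pvNearestIndex (p : Int) : Int :=
  let lo := pvBsearch p 0 (pvPRIME_VALUES.length : Int)
  if lo = 0 then 0
  else if lo = (pvPRIME_VALUES.length : Int) then lo - 1
  else if p - PySem.List.pyGetD pvPRIME_VALUES (lo - 1) 0 ≤ PySem.List.pyGetD pvPRIME_VALUES lo 0 - p then lo - 1
  else lo

def decrypt_with_prime_key_alt (cipher_indices : List Int) (key_primes : List Int) (operation : String) : List Int :=
  let step : Int := if operation == "sub" then -1 else 1
  let shifts : List Int := key_primes.map (fun p => PySem.Int.mod (step * pvNearestIndex p) 29)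
  -- shifts[k]: Python raises IndexError when shifts is empty (and cipher_indices is not); Pre_ excludes exactly that
  (cipher_indices.foldl (fun (s : List Int × Int) c =>
      let out := s.1 ++ [PySem.Int.mod (c + PySem.List.pyGetD shifts s.2 0) 29]
      let k := s.2 + 1
      (out, if k = (shifts.length : Int) then 0 else k)) ([], 0)).1

-- ===== PRECONDITION & SPEC =====
-- Pre_ excludes only inputs where BOTH Pythons raise (A: ZeroDivisionError, B: IndexError):
-- a non-empty cipher with an empty key. Nothing on which A returns is excluded.
def Pre_decrypt_with_prime_key (cipher_indices : List Int) (key_primes : List Int) (operation : String) : Prop :=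
  cipher_indices = [] ∨ key_primes ≠ []
instance (cipher_indices : List Int) (key_primes : List Int) (operation : String) : Decidable (Pre_decrypt_with_prime_key cipher_indices key_primes operation) := by unfold Pre_decrypt_with_prime_key; infer_instance

def pvWitness_decrypt_with_prime_key : List Int × List Int × String := ([5, 12, 0], [2, 110], "sub")

def Spec_decrypt_with_prime_key (cipher_indices : List Int) (key_primes : List Int) (operation : String) (out : List Int) : Prop := out = decrypt_with_prime_key_alt cipher_indices key_primes operation
instance (cipher_indices : List Int) (key_primes : List Int) (operation : String) (out : List Int) : Decidable (Spec_decrypt_with_prime_key cipher_indices key_primes operation out) := by unfold Spec_decrypt_with_prime_key; infer_instance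

-- ===== CLAIM (what is proved, stated in full; the proofs are below) =====
def Claim_equal_decrypt_with_prime_key : Prop := ∀ (cipher_indices : List Int) (key_primes : List Int) (operation : String), Dom_decrypt_with_prime_key cipher_indices key_primes operation → Pre_decrypt_with_prime_key cipher_indices key_primes operation → Spec_decrypt_with_prime_key cipher_indices key_primes operation (decrypt_with_prime_key cipher_indices key_primes operation)

-- ===== LEMMAS AND PROOFS =====

-- proof-side name for A's per-prime conversion
def pvKeyIdx (p : Int) : Int :=
  match pvPRIME_TO_INDEX.get? p with
  | some k => k
  | none => (pvPRIME_TO_INDEX.get? ((PySem.List.min? pvPRIME_VALUES (fun x => |x - p|)).getD 0)).getD 0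

-- A's first loop builds exactly the per-prime conversion pvKeyIdx computes
theorem keyIndices_eq_map (key_primes : List Int) :
    key_primes.foldl (fun acc p =>
      if pvPRIME_TO_INDEX.contains p then
        acc ++ [(pvPRIME_TO_INDEX.get? p).getD 0]
      else
        let closest := (PySem.List.min? pvPRIME_VALUES (fun x => |x - p|)).getD 0
        acc ++ [(pvPRIME_TO_INDEX.get? closest).getD 0]) []
    = key_primes.map pvKeyIdx := by
  have hbody : (fun (acc : List Int) (p : Int) =>
      if pvPRIME_TO_INDEX.contains p then
        acc ++ [(pvPRIME_TO_INDEX.get? p).getD 0]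
      else
        let closest := (PySem.List.min? pvPRIME_VALUES (fun x => |x - p|)).getD 0
        acc ++ [(pvPRIME_TO_INDEX.get? closest).getD 0])
      = fun acc p => acc ++ [pvKeyIdx p] := by
    funext acc p
    rw [PySem.Dict.contains_eq_isSome_get?]
    unfold pvKeyIdx
    cases h : pvPRIME_TO_INDEX.get? p
    · simp
    · simp
  rw [hbody, PySem.List.foldl_append_singleton_eq_map, List.nil_append]

theorem bsearchAux_step (p : Int) (f : Nat) (lo hi : Int) (h : lo < hi) :
    pvBsearchAux p (f + 1) lo hi =
      (if PySem.List.pyGetD pvPRIME_VALUES (PySem.Int.floordiv (lo + hi) 2) 0 < p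
       then pvBsearchAux p f (PySem.Int.floordiv (lo + hi) 2 + 1) hi
       else pvBsearchAux p f lo (PySem.Int.floordiv (lo + hi) 2)) := by
  rw [pvBsearchAux]; simp [h]

theorem bsearchAux_stop (p : Int) (f : Nat) (lo hi : Int) (h : ¬ lo < hi) :
    pvBsearchAux p f lo hi = lo := by
  cases f with
  | zero => rfl
  | succ f => rw [pvBsearchAux]; simp [h]

theorem bsearch_low (p : Int) (hp : p ≤ 2) : pvBsearch p 0 29 = 0 := by
  rw [pvBsearch, show ((29 : Int) - 0).toNat = 28 + 1 from by decide]
  rw [bsearchAux_step _ _ _ _ (by norm_num), show PySem.Int.floordiv (0 + 29) 2 = 14 from by decide,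
      show PySem.List.pyGetD pvPRIME_VALUES 14 0 = 47 from by decide, if_neg (by omega),
      show (28 : Nat) = 27 + 1 from rfl]
  rw [bsearchAux_step _ _ _ _ (by norm_num), show PySem.Int.floordiv (0 + 14) 2 = 7 from by decide,
      show PySem.List.pyGetD pvPRIME_VALUES 7 0 = 19 from by decide, if_neg (by omega),
      show (27 : Nat) = 26 + 1 from rfl]
  rw [bsearchAux_step _ _ _ _ (by norm_num), show PySem.Int.floordiv (0 + 7) 2 = 3 from by decide,
      show PySem.List.pyGetD pvPRIME_VALUES 3 0 = 7 from by decide, if_neg (by omega),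
      show (26 : Nat) = 25 + 1 from rfl]
  rw [bsearchAux_step _ _ _ _ (by norm_num), show PySem.Int.floordiv (0 + 3) 2 = 1 from by decide,
      show PySem.List.pyGetD pvPRIME_VALUES 1 0 = 3 from by decide, if_neg (by omega),
      show (25 : Nat) = 24 + 1 from rfl]
  rw [bsearchAux_step _ _ _ _ (by norm_num), show PySem.Int.floordiv (0 + 1) 2 = 0 from by decide,
      show PySem.List.pyGetD pvPRIME_VALUES 0 0 = 2 from by decide, if_neg (by omega)]
  exact bsearchAux_stop _ _ _ _ (by norm_num)

theorem bsearch_high (p : Int) (hp : 110 ≤ p) : pvBsearch p 0 29 = 29 := by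
  rw [pvBsearch, show ((29 : Int) - 0).toNat = 28 + 1 from by decide]
  rw [bsearchAux_step _ _ _ _ (by norm_num), show PySem.Int.floordiv (0 + 29) 2 = 14 from by decide,
      show PySem.List.pyGetD pvPRIME_VALUES 14 0 = 47 from by decide, if_pos (by omega),
      show (14 : Int) + 1 = 15 from by norm_num, show (28 : Nat) = 27 + 1 from rfl]
  rw [bsearchAux_step _ _ _ _ (by norm_num), show PySem.Int.floordiv (15 + 29) 2 = 22 from by decide,
      show PySem.List.pyGetD pvPRIME_VALUES 22 0 = 83 from by decide, if_pos (by omega),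
      show (22 : Int) + 1 = 23 from by norm_num, show (27 : Nat) = 26 + 1 from rfl]
  rw [bsearchAux_step _ _ _ _ (by norm_num), show PySem.Int.floordiv (23 + 29) 2 = 26 from by decide,
      show PySem.List.pyGetD pvPRIME_VALUES 26 0 = 103 from by decide, if_pos (by omega),
      show (26 : Int) + 1 = 27 from by norm_num, show (26 : Nat) = 25 + 1 from rfl]
  rw [bsearchAux_step _ _ _ _ (by norm_num), show PySem.Int.floordiv (27 + 29) 2 = 28 from by decide,
      show PySem.List.pyGetD pvPRIME_VALUES 28 0 = 109 from by decide, if_pos (by omega),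
      show (28 : Int) + 1 = 29 from by norm_num]
  exact bsearchAux_stop _ _ _ _ (by norm_num)

theorem len_PV : (pvPRIME_VALUES.length : Int) = 29 := by decide

theorem nearest_low (p : Int) (hp : p ≤ 1) : pvNearestIndex p = 0 := by
  unfold pvNearestIndex
  rw [len_PV, bsearch_low p (by omega)]
  simp

theorem nearest_high (p : Int) (hp : 110 ≤ p) : pvNearestIndex p = 28 := by
  unfold pvNearestIndex
  rw [len_PV, bsearch_high p hp]
  norm_num

theorem PV_bounds : ∀ x ∈ pvPRIME_VALUES, 2 ≤ x ∧ x ≤ 109 := by decide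

theorem get?_none_of_out (p : Int) (hout : p ≤ 1 ∨ 110 ≤ p) : pvPRIME_TO_INDEX.get? p = none := by
  rw [PySem.Dict.get?_eq_none_iff_not_mem_keys]
  intro hmem
  rw [show pvPRIME_TO_INDEX.keys = pvPRIME_VALUES from by decide] at hmem
  have := PV_bounds p hmem
  omega

theorem keyIdx_low (p : Int) (hp : p ≤ 1) : pvKeyIdx p = 0 := by
  unfold pvKeyIdx
  rw [get?_none_of_out p (Or.inl hp)]
  have hmin : PySem.List.min? pvPRIME_VALUES (fun x => |x - p|) = some 2 := by
    cases h : PySem.List.min? pvPRIME_VALUES (fun x => |x - p|) with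
    | none => exact absurd ((PySem.List.min?_eq_none_iff _ _).mp h) (by decide)
    | some m =>
      have hmem := PySem.List.min?_mem h
      have hb := PV_bounds m hmem
      have h2 := PySem.List.min?_isMin h 2 (by decide)
      have habs1 : |m - p| = m - p := abs_of_nonneg (by omega)
      have habs2 : |(2 : Int) - p| = 2 - p := abs_of_nonneg (by omega)
      simp only [habs1, habs2] at h2
      congr 1
      omega
  rw [hmin]
  decide

theorem keyIdx_high (p : Int) (hp : 110 ≤ p) : pvKeyIdx p = 28 := by
  unfold pvKeyIdx
  rw [get?_none_of_out p (Or.inr hp)]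
  have hmin : PySem.List.min? pvPRIME_VALUES (fun x => |x - p|) = some 109 := by
    cases h : PySem.List.min? pvPRIME_VALUES (fun x => |x - p|) with
    | none => exact absurd ((PySem.List.min?_eq_none_iff _ _).mp h) (by decide)
    | some m =>
      have hmem := PySem.List.min?_mem h
      have hb := PV_bounds m hmem
      have h2 := PySem.List.min?_isMin h 109 (by decide)
      have habs1 : |m - p| = p - m := by rw [abs_sub_comm]; exact abs_of_nonneg (by omega)
      have habs2 : |(109 : Int) - p| = p - 109 := by rw [abs_sub_comm]; exact abs_of_nonneg (by omega)
      simp only [habs1, habs2] at h2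
      congr 1
      omega
  rw [hmin]
  decide

set_option maxRecDepth 8192 in
theorem nearest_mid : ∀ q ∈ PySem.List.pyRange 2 110 1, pvNearestIndex q = pvKeyIdx q := by decide

theorem nearest_eq (p : Int) : pvNearestIndex p = pvKeyIdx p := by
  by_cases h1 : p ≤ 1
  · rw [nearest_low p h1, keyIdx_low p h1]
  · by_cases h2 : 110 ≤ p
    · rw [nearest_high p h2, keyIdx_high p h2]
    · exact nearest_mid p (PySem.List.mem_pyRange_one.mpr ⟨by omega, by omega⟩)

-- the two cyclic loops, generically: A indexes kI by i % n, B walks sh with a reset counter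
theorem loop_eq (kI sh : List Int) (op : String) (hlen : sh.length = kI.length) (hne : kI ≠ [])
    (helem : ∀ (t : Nat), t < kI.length → ∀ c : Int,
      (if op == "sub" then PySem.Int.mod (c - PySem.List.pyGetD kI (t : Int) 0) 29
       else PySem.Int.mod (c + PySem.List.pyGetD kI (t : Int) 0) 29)
      = PySem.Int.mod (c + PySem.List.pyGetD sh (t : Int) 0) 29) :
    ∀ (ci : List Int) (i j : Int) (out : List Int), 0 ≤ i → j = PySem.Int.mod i kI.length →
    (PySem.List.enumerate ci i).foldl (fun acc ic =>
        let k := PySem.List.pyGetD kI (PySem.Int.mod ic.1 kI.length) 0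
        if op == "sub" then acc ++ [PySem.Int.mod (ic.2 - k) 29]
        else acc ++ [PySem.Int.mod (ic.2 + k) 29]) out
    = (ci.foldl (fun (s : List Int × Int) c =>
        (s.1 ++ [PySem.Int.mod (c + PySem.List.pyGetD sh s.2 0) 29],
         if s.2 + 1 = (sh.length : Int) then 0 else s.2 + 1)) (out, j)).1 := by
  intro ci
  induction ci with
  | nil => intro i j out _ _; simp [PySem.List.enumerate_nil]
  | cons c t ih =>
    intro i j out hi hj
    have hn : 0 < (kI.length : Int) := by
      have : 0 < kI.length := List.length_pos_iff.mpr hne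
      omega
    have hj0 : 0 ≤ j := hj ▸ PySem.Int.mod_nonneg i hn
    have hjlt : j < (kI.length : Int) := hj ▸ PySem.Int.mod_lt i hn
    rw [PySem.List.enumerate_cons, List.foldl_cons, List.foldl_cons]
    simp only
    have hkey : PySem.Int.mod i (kI.length : Int) = (j.toNat : Int) := by
      rw [← hj]; omega
    rw [hkey, ← apply_ite (fun x => out ++ [x]), helem j.toNat (by omega) c,
        show ((j.toNat : Int)) = j from by omega]
    refine ih (i + 1) (if j + 1 = (sh.length : Int) then 0 else j + 1)
      (out ++ [PySem.Int.mod (c + PySem.List.pyGetD sh j 0) 29]) (by omega) ?_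
    have hmod : PySem.Int.mod i (kI.length : Int) = i % (kI.length : Int) :=
      PySem.Int.mod_eq_emod_of_pos hn
    have hmod1 : PySem.Int.mod (i + 1) (kI.length : Int) = (i + 1) % (kI.length : Int) :=
      PySem.Int.mod_eq_emod_of_pos hn
    have hij : i % (kI.length : Int) = j := by rw [← hmod, ← hj]
    have hjj : j % (kI.length : Int) = j := Int.emod_eq_of_lt hj0 hjlt
    have heq : (i + 1) % (kI.length : Int) = (j + 1) % (kI.length : Int) := by
      rw [Int.add_emod i 1, Int.add_emod j 1, hij, hjj]
    rw [hlen, hmod1, heq]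
    by_cases hc : j + 1 = (kI.length : Int)
    · rw [if_pos hc, hc, Int.emod_self]
    · rw [if_neg hc, Int.emod_eq_of_lt (by omega) (by omega)]

-- ===== VERDICT (by name: the statement is the Claim_ definition above) =====

theorem decrypt_with_prime_key_spec : Claim_equal_decrypt_with_prime_key := by
  intro ci ks op _ hpre
  unfold Spec_decrypt_with_prime_key decrypt_with_prime_key decrypt_with_prime_key_alt
  dsimp only
  rw [keyIndices_eq_map]
  by_cases hks : ks = []
  · have hci : ci = [] := by
      rcases hpre with h | h
      · exact h
      · exact absurd hks h
    subst hks hci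
    simp [PySem.List.enumerate_nil]
  · refine loop_eq (ks.map pvKeyIdx)
      (ks.map (fun p => PySem.Int.mod ((if op == "sub" then (-1 : Int) else 1) * pvNearestIndex p) 29))
      op (by simp) (by simpa using hks) ?_ ci 0 0 [] le_rfl ?_
    · intro t ht c
      rw [List.length_map] at ht
      rw [PySem.List.pyGetD_natCast, PySem.List.pyGetD_natCast,
          List.getD_eq_getElem _ _ (by simpa using ht), List.getD_eq_getElem _ _ (by simpa using ht),
          List.getElem_map, List.getElem_map, nearest_eq]
      have h29 : (0 : Int) < 29 := by norm_num
      split_ifs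
      · rw [PySem.Int.mod_eq_emod_of_pos h29, PySem.Int.mod_eq_emod_of_pos h29,
            PySem.Int.mod_eq_emod_of_pos h29]
        omega
      · rw [PySem.Int.mod_eq_emod_of_pos h29, PySem.Int.mod_eq_emod_of_pos h29,
            PySem.Int.mod_eq_emod_of_pos h29]
        omega
    · have hn : 0 < ((ks.map pvKeyIdx).length : Int) := by
        have : 0 < (ks.map pvKeyIdx).length := List.length_pos_iff.mpr (by simpa using hks)
        omega
      rw [PySem.Int.mod_eq_emod_of_pos hn]
      simp
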